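-- pv_equiv track=rewrite | github.com/AlexDross/fightmetrics | .github/update_fighters.py | compute_streak
-- ===== SOURCE A (Python) =====
-- def compute_streak(fights):
--     ws = ls = 0
--     for f in fights:
--         r = f['result']
--         if ws == 0 and ls == 0:
--             if r == 'W':   ws = 1
--             elif r == 'L': ls = 1
--         elif ws > 0:
--             if r == 'W':   ws += 1
--             else:           break
--         elif ls > 0:
--             if r == 'L':   ls += 1
--             else:           break
--     return ws, ls
-- ===== SOURCE B (Python) =====
-- def compute_streak(fights):
--     # Phase 1: lazily skip to the first 'W'/'L' result; Phase 2: count the run.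
--     it = iter(fights)
--     first = None
--     for f in it:
--         r = f['result']
--         if r in ('W', 'L'):
--             first = r
--             break
--     if first is None:
--         return (0, 0)
--     count = 1
--     for f in it:
--         if f['result'] != first:
--             break
--         count += 1
--     return (count, 0) if first == 'W' else (0, count)
-- ===== Notes on version B (the rewrite author's own statement) =====
-- stated objective: simpler
-- what changed: Replaces A's single loop over a (ws,ls) state machine with a two-phase scan over one shared iterator: find the first W/L result, then count its run; no counter pair is threaded through the skip phase.
-- outside the precondition, e.g. on compute_streak([{'result': 'W'}, {'result': 'L'}, {}]): A returns (1, 0), B returns (1, 0)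
import Mathlib
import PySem

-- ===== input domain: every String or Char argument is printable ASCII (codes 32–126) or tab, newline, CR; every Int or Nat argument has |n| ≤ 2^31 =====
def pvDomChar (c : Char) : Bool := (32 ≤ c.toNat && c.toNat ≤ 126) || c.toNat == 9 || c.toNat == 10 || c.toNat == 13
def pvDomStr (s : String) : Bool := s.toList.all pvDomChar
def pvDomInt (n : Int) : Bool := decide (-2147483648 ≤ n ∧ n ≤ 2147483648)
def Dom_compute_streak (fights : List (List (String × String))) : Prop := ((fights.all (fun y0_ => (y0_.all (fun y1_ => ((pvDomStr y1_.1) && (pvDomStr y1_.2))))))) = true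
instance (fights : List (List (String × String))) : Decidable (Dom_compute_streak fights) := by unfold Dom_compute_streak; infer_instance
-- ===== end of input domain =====

-- B replaces A's single loop over a (ws,ls) state machine with a simpler two-phase scan
-- (find the first W/L result, then count its run); same O(n) cost, return value only.

-- ===== PORT A =====
-- f['result'] : dict lookup = first match in the association list (KeyError = none, excluded by Pre_;
-- the .getD "" default is never reached under Pre_).
def compute_streakA_loop : List (List (String × String)) → Int → Int → Int × Int
  | [], ws, ls => (ws, ls)
  | f :: rest, ws, ls =>
    let r := (List.lookup "result" f).getD ""
    if ws == 0 && ls == 0 then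
      if r == "W" then compute_streakA_loop rest 1 ls
      else if r == "L" then compute_streakA_loop rest ws 1
      else compute_streakA_loop rest ws ls
    else if ws > 0 then
      (if r == "W" then compute_streakA_loop rest (ws + 1) ls else (ws, ls))
    else if ls > 0 then
      (if r == "L" then compute_streakA_loop rest ws (ls + 1) else (ws, ls))
    else compute_streakA_loop rest ws ls

def compute_streak (fights : List (List (String × String))) : Int × Int :=
  compute_streakA_loop fights 0 0

-- ===== PORT B =====
-- Phase 1: skip to the first 'W'/'L' result, returning it with the remaining iterator.
def compute_streakB_find : List (List (String × String)) → Option (String × List (List (String × String)))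
  | [] => none
  | f :: rest =>
    let r := (List.lookup "result" f).getD ""
    if r == "W" || r == "L" then some (r, rest) else compute_streakB_find rest

-- Phase 2: count the run of results equal to `first`.
def compute_streakB_count (first : String) : List (List (String × String)) → Int
  | [] => 0
  | f :: rest =>
    if (List.lookup "result" f).getD "" != first then 0
    else 1 + compute_streakB_count first rest

def compute_streak_alt (fights : List (List (String × String))) : Int × Int :=
  match compute_streakB_find fights with
  | none => (0, 0)
  | some (first, rest) =>
    let count := 1 + compute_streakB_count first rest
    if first == "W" then (count, 0) else (0, count)

-- ===== PRECONDITION & SPEC =====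
-- Pre_ excludes any fight dict lacking the 'result' key, on which Python raises KeyError.
-- This is slightly narrower than necessary: A (and B, which reads the list equally lazily)
-- never reads fights after the streak breaks, so a missing key there does not raise; both
-- programs return the same value on such inputs (see claim.json cites).
def Pre_compute_streak (fights : List (List (String × String))) : Prop :=
  ∀ f ∈ fights, (List.lookup "result" f).isSome = true
instance (fights : List (List (String × String))) : Decidable (Pre_compute_streak fights) := by
  unfold Pre_compute_streak; infer_instance

def pvWitness_compute_streak : (List (List (String × String))) :=
  [[("result", "L")], [("result", "L")], [("result", "W")]]

def Spec_compute_streak (fights : List (List (String × String))) (out : Int × Int) : Prop := out = compute_streak_alt fights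
instance (fights : List (List (String × String))) (out : Int × Int) : Decidable (Spec_compute_streak fights out) := by unfold Spec_compute_streak; infer_instance

-- ===== CLAIM (what is proved, stated in full; the proofs are below) =====
def Claim_equal_compute_streak : Prop := ∀ (fights : List (List (String × String))), Dom_compute_streak fights → Pre_compute_streak fights → Spec_compute_streak fights (compute_streak fights)

-- ===== LEMMAS AND PROOFS =====

-- In the counting state (ws > 0, ls = 0), A's loop adds B's run count for "W".
lemma streak_countW (rest : List (List (String × String))) :
    ∀ ws : Int, 0 < ws →
      compute_streakA_loop rest ws 0 = (ws + compute_streakB_count "W" rest, 0) := by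
  induction rest with
  | nil => intro ws _; simp [compute_streakA_loop, compute_streakB_count]
  | cons f rest ih =>
    intro ws hws
    simp only [compute_streakA_loop, compute_streakB_count]
    have h0 : (ws == 0) = false := by simp; omega
    by_cases hr : ((List.lookup "result" f).getD "" == "W") = true
    · have hr' : (List.lookup "result" f).getD "" = "W" := by simpa using hr
      simp [h0, hws, hr', ih (ws + 1) (by omega)]; ring
    · simp at hr
      simp [h0, hws, hr]

-- Symmetrically for "L".
lemma streak_countL (rest : List (List (String × String))) :
    ∀ ls : Int, 0 < ls →
      compute_streakA_loop rest 0 ls = (0, ls + compute_streakB_count "L" rest) := by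
  induction rest with
  | nil => intro ls _; simp [compute_streakA_loop, compute_streakB_count]
  | cons f rest ih =>
    intro ls hls
    simp only [compute_streakA_loop, compute_streakB_count]
    have h0 : (ls == 0) = false := by simp; omega
    by_cases hr : ((List.lookup "result" f).getD "" == "L") = true
    · have hr' : (List.lookup "result" f).getD "" = "L" := by simpa using hr
      simp [h0, hls, hr', ih (ls + 1) (by omega)]; ring
    · simp at hr
      simp [h0, hls, hr]

-- In the seek state (0,0), A's loop equals B's two-phase computation.
lemma streak_seek (fights : List (List (String × String))) :
    compute_streakA_loop fights 0 0 = compute_streak_alt fights := by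
  induction fights with
  | nil => simp [compute_streakA_loop, compute_streak_alt, compute_streakB_find]
  | cons f rest ih =>
    simp only [compute_streakA_loop, compute_streak_alt, compute_streakB_find]
    by_cases hW : ((List.lookup "result" f).getD "" == "W") = true
    · have hW' : (List.lookup "result" f).getD "" = "W" := by simpa using hW
      simp [hW', streak_countW rest 1 (by omega)]
    · by_cases hL : ((List.lookup "result" f).getD "" == "L") = true
      · have hL' : (List.lookup "result" f).getD "" = "L" := by simpa using hL
        simp [hL', streak_countL rest 1 (by omega)]
      · simp at hW hL
        simpa [hW, hL, compute_streak_alt] using ih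

-- ===== VERDICT (by name: the statement is the Claim_ definition above) =====
theorem compute_streak_spec : Claim_equal_compute_streak := by
  intro fights _ _
  unfold Spec_compute_streak compute_streak
  exact streak_seek fights
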